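-- pv_equiv track=rewrite | github.com/Oss53pa/Atlas-Finance | apps/reporting/services/dashboard_service.py | _generer_couleurs
-- ===== SOURCE A (Python) =====
-- from typing import List, Dict, Any, Optional
--
-- def _generer_couleurs(nombre: int) -> List[str]:
--     """
--     Génère une palette de couleurs pour les graphiques
--     """
--     couleurs_base = [
--         '#3B82F6', '#10B981', '#F59E0B', '#EF4444',
--         '#8B5CF6', '#06B6D4', '#84CC16', '#F97316'
--     ]
--
--     couleurs = []
--     for i in range(nombre):
--         couleurs.append(couleurs_base[i % len(couleurs_base)])
--
--     return couleurs
-- ===== SOURCE B (Python) =====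
-- from typing import List
--
-- def _generer_couleurs(nombre: int) -> List[str]:
--     """
--     Génère une palette de couleurs pour les graphiques
--     """
--     couleurs_base = [
--         '#3B82F6', '#10B981', '#F59E0B', '#EF4444',
--         '#8B5CF6', '#06B6D4', '#84CC16', '#F97316'
--     ]
--     return (couleurs_base * (nombre // len(couleurs_base) + 1))[:nombre]
-- ===== Notes on version B (the rewrite author's own statement) =====
-- stated objective: idiomatic
-- what changed: Replaces the per-index loop with modulo indexing by a single list repetition (tiling) followed by a slice truncating to the requested length.
import Mathlib
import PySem

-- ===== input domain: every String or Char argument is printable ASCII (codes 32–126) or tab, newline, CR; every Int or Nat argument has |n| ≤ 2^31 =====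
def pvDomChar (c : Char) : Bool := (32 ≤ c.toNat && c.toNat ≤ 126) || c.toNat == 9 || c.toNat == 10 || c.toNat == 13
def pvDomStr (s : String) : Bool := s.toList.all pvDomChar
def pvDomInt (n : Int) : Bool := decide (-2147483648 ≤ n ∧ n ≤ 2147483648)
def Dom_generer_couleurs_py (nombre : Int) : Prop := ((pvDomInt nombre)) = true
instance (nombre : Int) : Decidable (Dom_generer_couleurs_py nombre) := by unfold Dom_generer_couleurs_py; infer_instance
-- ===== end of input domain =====

-- B replaces A's per-index loop with modulo indexing by list repetition (tiling) plus a truncating slice (idiomatic).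

-- ===== PORT A =====
-- the base palette literal of A
def couleursBaseA : List String :=
  ["#3B82F6", "#10B981", "#F59E0B", "#EF4444",
   "#8B5CF6", "#06B6D4", "#84CC16", "#F97316"]

-- couleurs = []; for i in range(nombre): couleurs.append(couleurs_base[i % len(couleurs_base)])
-- the index i % 8 is always in range 0..7, so pyGetD's default is never used
def generer_couleurs_py (nombre : Int) : List String :=
  (PySem.List.pyRange 0 nombre 1).foldl
    (fun couleurs i =>
      couleurs ++ [PySem.List.pyGetD couleursBaseA (PySem.Int.mod i (couleursBaseA.length : Int)) ""]) []

-- ===== PORT B =====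
-- the base palette literal of B
def couleursBaseB : List String :=
  ["#3B82F6", "#10B981", "#F59E0B", "#EF4444",
   "#8B5CF6", "#06B6D4", "#84CC16", "#F97316"]

-- return (couleurs_base * (nombre // len(couleurs_base) + 1))[:nombre]
-- Python list repetition with a non-positive count yields [], which .toNat on the count captures exactly
def generer_couleurs_py_alt (nombre : Int) : List String :=
  PySem.List.slice
    (List.flatten (List.replicate
      (PySem.Int.floordiv nombre (couleursBaseB.length : Int) + 1).toNat couleursBaseB))
    none (some nombre)

-- ===== PRECONDITION & SPEC =====
def Spec_generer_couleurs_py (nombre : Int) (out : List String) : Prop := out = generer_couleurs_py_alt nombre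
instance (nombre : Int) (out : List String) : Decidable (Spec_generer_couleurs_py nombre out) := by unfold Spec_generer_couleurs_py; infer_instance

-- ===== CLAIM (what is proved, stated in full; the proofs are below) =====
def Claim_equal_generer_couleurs_py : Prop := ∀ (nombre : Int), Dom_generer_couleurs_py nombre → Spec_generer_couleurs_py nombre (generer_couleurs_py nombre)

-- ===== LEMMAS AND PROOFS =====

-- the element produced at step k, on the Nat side
def couleurF (k : Nat) : String := couleursBaseB.getD (k % 8) ""

lemma baseA_eq_baseB : couleursBaseA = couleursBaseB := rfl

lemma portA_eq_map (n : Nat) :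
    generer_couleurs_py (n : Int) = (List.range n).map couleurF := by
  unfold generer_couleurs_py
  induction n with
  | zero => simp [PySem.List.pyRange_one_eq_nil]
  | succ m ih =>
      have h : PySem.List.pyRange 0 ((m : Int) + 1) 1
          = PySem.List.pyRange 0 (m : Int) 1 ++ [(m : Int)] := by
        exact PySem.List.pyRange_one_succ_right (by exact_mod_cast Nat.zero_le m)
      have hcast : ((m + 1 : Nat) : Int) = (m : Int) + 1 := by push_cast; ring
      rw [hcast, h, List.foldl_append]
      rw [ih]
      rw [List.range_succ, List.map_append, List.foldl_cons, List.foldl_nil]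
      congr 1
      show [_] = List.map couleurF [m]
      show [_] = [couleurF m]
      rw [baseA_eq_baseB]
      rw [show PySem.Int.mod (m : Int) ((couleursBaseB.length : Nat) : Int) = ((m % 8 : Nat) : Int) from
        PySem.Int.mod_natCast m 8]
      rw [PySem.List.pyGetD_natCast]
      rfl

lemma tile_eq_map (k : Nat) :
    List.flatten (List.replicate k couleursBaseB) = (List.range (8 * k)).map couleurF := by
  induction k with
  | zero => simp
  | succ m ih =>
      rw [List.replicate_succ', List.flatten_append, ih]
      have hr : List.range (8 * (m + 1)) = List.range (8 * m) ++ (List.range 8).map (8 * m + ·) := by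
        have : 8 * (m + 1) = 8 * m + 8 := by ring
        rw [this, List.range_add]
      rw [hr, List.map_append, List.map_map]
      congr 1
      rw [List.map_congr_left (l := List.range 8)
        (f := couleurF ∘ fun j => 8 * m + j) (g := couleurF)
        (fun j _ => by show couleurF (8 * m + j) = couleurF j; unfold couleurF; congr 1; omega)]
      decide

lemma portB_eq_map (n : Nat) :
    generer_couleurs_py_alt (n : Int) = (List.range n).map couleurF := by
  unfold generer_couleurs_py_alt
  have hlen : (couleursBaseB.length : Int) = (8 : Int) := by decide
  rw [hlen]
  have hfd : PySem.Int.floordiv (n : Int) ((8 : Nat) : Int) = ((n / 8 : Nat) : Int) :=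
    PySem.Int.floordiv_natCast n 8
  rw [show ((8:Int)) = ((8:Nat):Int) from rfl, hfd]
  have hk : (((n / 8 : Nat) : Int) + 1).toNat = n / 8 + 1 := by omega
  rw [hk, tile_eq_map, PySem.List.slice_to_natCast]
  rw [← List.map_take, List.take_range]
  rw [Nat.min_eq_left (by omega)]

lemma ports_eq_nonneg (n : Nat) :
    generer_couleurs_py (n : Int) = generer_couleurs_py_alt (n : Int) := by
  rw [portA_eq_map, portB_eq_map]

lemma ports_eq_neg (nombre : Int) (h : nombre < 0) :
    generer_couleurs_py nombre = generer_couleurs_py_alt nombre := by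
  unfold generer_couleurs_py generer_couleurs_py_alt
  rw [PySem.List.pyRange_one_eq_nil (by omega), List.foldl_nil]
  have hlen : (couleursBaseB.length : Int) = (8 : Int) := by decide
  rw [hlen]
  have hfd : PySem.Int.floordiv nombre 8 + 1 ≤ 0 := by
    have := PySem.Int.floordiv_eq_iff_of_pos (a := nombre) (b := 8)
      (q := PySem.Int.floordiv nombre 8) (by omega)
    have h2 := (this.mp rfl)
    omega
  rw [show (PySem.Int.floordiv nombre 8 + 1).toNat = 0 from by omega]
  simp [PySem.List.slice]

-- ===== VERDICT (by name: the statement is the Claim_ definition above) =====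
theorem generer_couleurs_py_spec : Claim_equal_generer_couleurs_py := by
  intro nombre _
  unfold Spec_generer_couleurs_py
  rcases Int.lt_or_le nombre 0 with h | h
  · exact ports_eq_neg nombre h
  · obtain ⟨n, rfl⟩ := Int.eq_ofNat_of_zero_le h
    exact ports_eq_nonneg n
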